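-- pv_equiv track=rewrite | github.com/detektia/MiaplPy | stackSentinel_squeesar.py | selectNeighborPairs
-- ===== SOURCE A (Python) =====
-- def selectNeighborPairs(dateList, num_connections):
--
--     pairs = []
--     if num_connections == 'all':
--         num_connections = len(dateList) - 1
--     else:
--         num_connections = int(num_connections)
--
--     num_connections = num_connections + 1
--     for i in range(len(dateList)-1):
--         for j in range(i+1,i + num_connections):
--             if j<len(dateList):
--                 pairs.append((dateList[i],dateList[j]))
--     return pairs
-- ===== SOURCE B (Python) =====
-- from itertools import combinations
--
--
-- def selectNeighborPairs(dateList, num_connections):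
--     if num_connections == 'all':
--         num_connections = len(dateList) - 1
--     else:
--         num_connections = int(num_connections)
--     num_connections = num_connections + 1
--     return [(a, b)
--             for (i, a), (j, b) in combinations(enumerate(dateList), 2)
--             if j - i < num_connections]
-- ===== Notes on version B (the rewrite author's own statement) =====
-- stated objective: idiomatic
-- what changed: Replaces the nested index loops with bounded inner range and an in-range guard by a generate-and-filter comprehension over itertools.combinations(enumerate(dateList), 2), keeping pairs whose index gap lies within the connection window.
import Mathlib
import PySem

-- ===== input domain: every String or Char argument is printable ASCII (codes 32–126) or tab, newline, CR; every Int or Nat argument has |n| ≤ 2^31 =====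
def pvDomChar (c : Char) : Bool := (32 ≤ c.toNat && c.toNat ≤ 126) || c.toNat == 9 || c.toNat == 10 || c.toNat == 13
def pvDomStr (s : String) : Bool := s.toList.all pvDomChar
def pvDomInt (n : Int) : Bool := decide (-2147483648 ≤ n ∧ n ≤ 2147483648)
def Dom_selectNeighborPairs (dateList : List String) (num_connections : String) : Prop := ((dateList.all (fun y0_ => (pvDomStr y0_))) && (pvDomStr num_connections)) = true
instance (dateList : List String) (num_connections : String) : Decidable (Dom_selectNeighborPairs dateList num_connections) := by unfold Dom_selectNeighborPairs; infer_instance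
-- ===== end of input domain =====

-- B rebuilds the pair list as a generate-and-filter comprehension over combinations of
-- enumerate(dateList) instead of A's bounded nested index loops (objective: idiomatic).

-- ===== PORT A =====
-- num_connections preprocessing: 'all' -> len-1, else int(s); then + 1 (ValueError excluded by Pre_)
def pvPrepA (dateList : List String) (num_connections : String) : Int :=
  (if num_connections = "all" then (dateList.length : Int) - 1
   else (PySem.Int.ofStr? num_connections).getD 0) + 1

def selectNeighborPairs (dateList : List String) (num_connections : String) : List (String × String) :=
  (PySem.List.pyRange 0 ((dateList.length : Int) - 1) 1).foldl (fun pairs i =>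
    (PySem.List.pyRange (i + 1) (i + pvPrepA dateList num_connections) 1).foldl (fun pairs j =>
      if j < (dateList.length : Int) then
        pairs ++ [(PySem.List.pyGetD dateList i "", PySem.List.pyGetD dateList j "")]
      else pairs) pairs) []

-- ===== PORT B =====
def pvPrepB (dateList : List String) (num_connections : String) : Int :=
  (if num_connections = "all" then (dateList.length : Int) - 1
   else (PySem.Int.ofStr? num_connections).getD 0) + 1

def selectNeighborPairs_alt (dateList : List String) (num_connections : String) : List (String × String) :=
  (PySem.List.combinations (PySem.List.enumerate dateList 0) 2).filterMap (fun c =>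
    match c with
    | [(i, a), (j, b)] => if j - i < pvPrepB dateList num_connections then some (a, b) else none
    | _ => none)

-- ===== PRECONDITION & SPEC =====
-- Pre_ excludes exactly the inputs where Python A raises ValueError: num_connections neither 'all' nor a valid int() literal.
def Pre_selectNeighborPairs (_dateList : List String) (num_connections : String) : Prop :=
  num_connections = "all" ∨ (PySem.Int.ofStr? num_connections).isSome = true
instance (dateList : List String) (num_connections : String) : Decidable (Pre_selectNeighborPairs dateList num_connections) := by unfold Pre_selectNeighborPairs; infer_instance

def pvWitness_selectNeighborPairs : List String × String := (["20200101", "20200113", "20200125", "20200206"], "2")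

def Spec_selectNeighborPairs (dateList : List String) (num_connections : String) (out : List (String × String)) : Prop := out = selectNeighborPairs_alt dateList num_connections
instance (dateList : List String) (num_connections : String) (out : List (String × String)) : Decidable (Spec_selectNeighborPairs dateList num_connections out) := by unfold Spec_selectNeighborPairs; infer_instance

-- ===== CLAIM (what is proved, stated in full; the proofs are below) =====
def Claim_equal_selectNeighborPairs : Prop := ∀ (dateList : List String) (num_connections : String), Dom_selectNeighborPairs dateList num_connections → Pre_selectNeighborPairs dateList num_connections → Spec_selectNeighborPairs dateList num_connections (selectNeighborPairs dateList num_connections)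

-- ===== LEMMAS AND PROOFS =====

-- canonical form both ports are reduced to: for each suffix x :: xs, pair x with the first m elements of xs
def pvCanon (m : Nat) : List String → List (String × String)
  | [] => []
  | x :: xs => (xs.take m).map (fun y => (x, y)) ++ pvCanon m xs

lemma pvEnumFilter (x : String) (xs : List String) : ∀ (s t n : Int),
    (PySem.List.enumerate xs s).filterMap (fun p => if p.1 - t < n then some (x, p.2) else none)
    = (xs.take (t + n - s).toNat).map (fun y => (x, y)) := by
  induction xs with
  | nil => intro s t n; simp [PySem.List.enumerate_nil]
  | cons y ys ih =>
    intro s t n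
    rw [PySem.List.enumerate_cons]
    by_cases h : s - t < n
    · have htk : (t + n - s).toNat = (t + n - (s + 1)).toNat + 1 := by omega
      simp only [List.filterMap_cons, h, if_pos, htk, List.take_succ_cons, List.map_cons,
        ih (s + 1) t n]
    · have h0 : (t + n - s).toNat = 0 := by omega
      have h1 : (t + n - (s + 1)).toNat = 0 := by omega
      simp [h, h0, h1, ih (s + 1) t n]

lemma pvAltCanon (n : Int) (xs : List String) : ∀ (s : Int),
    (PySem.List.combinations (PySem.List.enumerate xs s) 2).filterMap (fun c =>
      match c with
      | [(i, a), (j, b)] => if j - i < n then some (a, b) else none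
      | _ => none)
    = pvCanon (n - 1).toNat xs := by
  induction xs with
  | nil => intro s; simp [PySem.List.enumerate_nil, PySem.List.combinations_nil_succ, pvCanon]
  | cons x xs ih =>
    intro s
    rw [PySem.List.enumerate_cons, PySem.List.combinations_cons_succ,
      PySem.List.combinations_one, List.filterMap_append, List.map_map, List.filterMap_map,
      ih (s + 1)]
    rw [List.filterMap_congr (g := fun p : Int × String =>
        if p.1 - s < n then some (x, p.2) else none)
      (fun p _ => by obtain ⟨j, b⟩ := p; rfl)]
    rw [pvEnumFilter x xs (s + 1) s n]
    have harg : s + n - (s + 1) = n - 1 := by omega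
    rw [harg]
    rfl

lemma pvFilterLtRange (a b L : Int) :
    (PySem.List.pyRange a b 1).filter (fun j => decide (j < L)) = PySem.List.pyRange a (min b L) 1 := by
  by_cases hba : b ≤ a
  · rw [PySem.List.pyRange_one_eq_nil hba, PySem.List.pyRange_one_eq_nil (by omega)]
    rfl
  · by_cases hLa : L ≤ a
    · have hmin : min b L = L := by omega
      rw [hmin, PySem.List.pyRange_one_eq_nil hLa]
      refine List.filter_eq_nil_iff.mpr ?_
      intro x hx
      rw [PySem.List.mem_pyRange_one] at hx
      simpa using (by omega : ¬ x < L)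
    · have h1 : a ≤ min b L := by omega
      have h2 : min b L ≤ b := by omega
      rw [PySem.List.pyRange_one_append a (min b L) b h1 h2, List.filter_append]
      have hfst : (PySem.List.pyRange a (min b L) 1).filter (fun j => decide (j < L))
          = PySem.List.pyRange a (min b L) 1 := by
        refine List.filter_eq_self.mpr ?_
        intro x hx
        rw [PySem.List.mem_pyRange_one] at hx
        simpa using (by omega : x < L)
      have hsnd : (PySem.List.pyRange (min b L) b 1).filter (fun j => decide (j < L)) = [] := by
        refine List.filter_eq_nil_iff.mpr ?_
        intro x hx
        rw [PySem.List.mem_pyRange_one] at hx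
        simpa using (by omega : ¬ x < L)
      rw [hfst, hsnd, List.append_nil]

lemma pvMapGetRange (d : List String) (a c : Int) (h0 : 0 ≤ a) (hc : c ≤ (d.length : Int)) :
    (PySem.List.pyRange a c 1).map (fun j => PySem.List.pyGetD d j "")
    = (d.drop a.toNat).take (c - a).toNat := by
  by_cases hca : c ≤ a
  · rw [PySem.List.pyRange_one_eq_nil hca]
    have : (c - a).toNat = 0 := by omega
    rw [this, List.take_zero, List.map_nil]
  · have hsplit : PySem.List.pyRange a (d.length : Int) 1
        = PySem.List.pyRange a c 1 ++ PySem.List.pyRange c (d.length : Int) 1 :=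
      PySem.List.pyRange_one_append a c _ (by omega) hc
    have hall : (PySem.List.pyRange a (d.length : Int) 1).map (fun j => PySem.List.pyGetD d j "")
        = d.drop a.toNat := PySem.List.map_pyGetD_pyRange' d "" h0
    rw [hsplit, List.map_append] at hall
    have hlen : ((PySem.List.pyRange a c 1).map (fun j => PySem.List.pyGetD d j "")).length
        = (c - a).toNat := by
      rw [List.length_map, PySem.List.length_pyRange_one]
    rw [← hall, List.take_left' hlen]

lemma pvMapPairRange (d : List String) (c0 : String) (a c : Int) (h0 : 0 ≤ a)
    (hc : c ≤ (d.length : Int)) :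
    (PySem.List.pyRange a c 1).map (fun j => (c0, PySem.List.pyGetD d j ""))
    = ((d.drop a.toNat).take (c - a).toNat).map (fun y => (c0, y)) := by
  have h := congrArg (List.map (fun y => (c0, y))) (pvMapGetRange d a c h0 hc)
  rw [List.map_map] at h
  exact h

lemma pvTakeMin (l : List String) (a b : Int) (hb : (l.length : Int) = b) :
    l.take (min a b).toNat = l.take a.toNat := by
  by_cases h : a ≤ b
  · have : min a b = a := by omega
    rw [this]
  · have : min a b = b := by omega
    rw [this, List.take_of_length_le (by omega), List.take_of_length_le (by omega)]

lemma pvCanonFlat (m : Nat) (d : List String) :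
    pvCanon m d = (List.range d.length).flatMap
      (fun k => ((d.drop (k + 1)).take m).map (fun y => (d.getD k "", y))) := by
  induction d with
  | nil => simp [pvCanon]
  | cons x xs ih =>
    rw [pvCanon, List.length_cons, List.range_succ_eq_map, List.flatMap_cons, List.flatMap_map]
    simp only [List.drop_succ_cons, List.drop_zero, List.getD_cons_zero, List.getD_cons_succ]
    rw [ih]

lemma pvBlockEq (d : List String) (n : Int) (k : Nat) (hk : (k : Int) < (d.length : Int) - 1) :
    ((PySem.List.pyRange ((k : Int) + 1) ((k : Int) + n) 1).filter
        (fun j => decide (j < (d.length : Int)))).map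
      (fun j => (PySem.List.pyGetD d (k : Int) "", PySem.List.pyGetD d j ""))
    = ((d.drop (k + 1)).take (n - 1).toNat).map (fun y => (d.getD k "", y)) := by
  rw [pvFilterLtRange, pvMapPairRange d _ _ _ (by omega) (by omega)]
  have h1 : ((k : Int) + 1).toNat = k + 1 := by omega
  have h2 : min ((k : Int) + n) (d.length : Int) - ((k : Int) + 1)
      = min (n - 1) ((d.length : Int) - ((k : Int) + 1)) := by omega
  have h3 : (((d.drop (k + 1)).length : Int)) = (d.length : Int) - ((k : Int) + 1) := by
    rw [List.length_drop]; omega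
  rw [h1, h2, pvTakeMin _ _ _ h3, PySem.List.pyGetD_natCast]

lemma pvACanon (d : List String) (n : Int) :
    (PySem.List.pyRange 0 ((d.length : Int) - 1) 1).foldl (fun pairs i =>
      (PySem.List.pyRange (i + 1) (i + n) 1).foldl (fun pairs j =>
        if j < (d.length : Int) then
          pairs ++ [(PySem.List.pyGetD d i "", PySem.List.pyGetD d j "")]
        else pairs) pairs) []
    = pvCanon (n - 1).toNat d := by
  simp only [PySem.List.foldl_append_ite]
  rw [PySem.List.foldl_append_eq_flatMap, List.nil_append]
  cases d with
  | nil =>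
    rw [show ((([] : List String).length : Int) - 1) = -1 by simp,
      PySem.List.pyRange_one_eq_nil (by omega)]
    rw [List.flatMap_nil, pvCanon]
  | cons x xs =>
    have hc : ((x :: xs).length : Int) - 1 = ((xs.length : Nat) : Int) := by
      push_cast [List.length_cons]; omega
    rw [hc, PySem.List.pyRange_zero_natCast, List.flatMap_map, pvCanonFlat]
    conv_rhs => rw [show (x :: xs).length = xs.length + 1 from rfl, List.range_succ]
    rw [List.flatMap_append, List.flatMap_cons, List.flatMap_nil]
    have hlast : (((x :: xs).drop (xs.length + 1)).take (n - 1).toNat).map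
        (fun y => ((x :: xs).getD xs.length "", y)) = [] := by
      rw [List.drop_of_length_le (by simp), List.take_nil, List.map_nil]
    simp only [hlast, List.append_nil]
    refine List.flatMap_congr (fun k hk => pvBlockEq (x :: xs) n k ?_)
    rw [List.mem_range] at hk
    simp only [List.length_cons]
    push_cast
    omega

-- ===== VERDICT (by name: the statement is the Claim_ definition above) =====
theorem selectNeighborPairs_spec : Claim_equal_selectNeighborPairs := by
  intro d s _ _
  unfold Spec_selectNeighborPairs selectNeighborPairs selectNeighborPairs_alt
  rw [pvACanon d (pvPrepA d s), pvAltCanon (pvPrepB d s) d 0]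
  rfl
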